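-- pv_equiv track=rewrite | github.com/jemtca/CodingBat | Python/List-2/either24.py | either24
-- ===== SOURCE A (Python) =====
-- def either24(nums):
--     b = False
--     two = False
--     four = False
--
--     for x in range(len(nums)-1):
--         if nums[x] == 2 and nums[x+1] == 2:
--             b = True
--             two = True
--         elif nums[x] == 4 and nums[x+1] == 4:
--             b = True
--             four = True
--
--     if two and four:
--         b = False
--
--     return b
-- ===== SOURCE B (Python) =====
-- def either24(nums):
--     pairs = range(len(nums) - 1)
--     has22 = any(nums[i] == 2 and nums[i + 1] == 2 for i in pairs)
--     has44 = any(nums[i] == 4 and nums[i + 1] == 4 for i in pairs)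
--     return has22 != has44
-- ===== Notes on version B (the rewrite author's own statement) =====
-- stated objective: simpler
-- what changed: Replaced A's single flag-maintaining pass with post-loop correction by two independent existence scans (has22, has44) combined with a boolean XOR.
import Mathlib
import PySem

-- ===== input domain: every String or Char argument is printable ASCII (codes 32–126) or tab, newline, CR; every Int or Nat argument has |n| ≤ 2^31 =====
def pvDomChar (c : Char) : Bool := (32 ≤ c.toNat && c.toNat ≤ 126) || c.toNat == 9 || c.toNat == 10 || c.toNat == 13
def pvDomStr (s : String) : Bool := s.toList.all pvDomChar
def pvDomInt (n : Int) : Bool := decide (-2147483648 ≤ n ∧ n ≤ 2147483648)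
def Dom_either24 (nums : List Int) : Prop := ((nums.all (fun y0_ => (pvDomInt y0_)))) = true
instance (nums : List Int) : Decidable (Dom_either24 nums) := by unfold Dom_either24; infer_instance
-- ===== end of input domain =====

-- B is simpler: two independent existence scans for an adjacent 2-2 and an adjacent 4-4 pair, combined by XOR, instead of A's flag-maintaining pass with a post-loop correction.

-- ===== PORT A =====
-- A's loop over adjacent pairs, carrying the three flags (b, two, four).
def either24Loop (l : List Int) (b two four : Bool) : Bool × Bool × Bool :=
  match l with
  | x :: y :: rest =>
      if x == 2 && y == 2 then either24Loop (y :: rest) true true four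
      else if x == 4 && y == 4 then either24Loop (y :: rest) true two true
      else either24Loop (y :: rest) b two four
  | _ => (b, two, four)

def either24 (nums : List Int) : Bool :=
  let r := either24Loop nums false false false
  let b := r.1
  let two := r.2.1
  let four := r.2.2
  if two && four then false else b

-- ===== PORT B =====
-- existence of an adjacent pair (v, v)
def hasPair (v : Int) : List Int → Bool
  | x :: y :: rest => (x == v && y == v) || hasPair v (y :: rest)
  | _ => false

def either24_alt (nums : List Int) : Bool :=
  hasPair 2 nums != hasPair 4 nums

-- ===== PRECONDITION & SPEC =====
def Spec_either24 (nums : List Int) (out : Bool) : Prop := out = either24_alt nums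
instance (nums : List Int) (out : Bool) : Decidable (Spec_either24 nums out) := by unfold Spec_either24; infer_instance

-- ===== CLAIM (what is proved, stated in full; the proofs are below) =====
def Claim_equal_either24 : Prop := ∀ (nums : List Int), Dom_either24 nums → Spec_either24 nums (either24 nums)

-- ===== LEMMAS AND PROOFS =====
lemma either24Loop_eq (l : List Int) : ∀ (b two four : Bool),
    either24Loop l b two four =
      (b || hasPair 2 l || hasPair 4 l, two || hasPair 2 l, four || hasPair 4 l) := by
  induction l with
  | nil => intro b two four; simp [either24Loop, hasPair]
  | cons x t ih =>
    intro b two four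
    cases t with
    | nil => simp [either24Loop, hasPair]
    | cons y rest =>
      simp only [either24Loop, hasPair]
      cases h1 : (x == 2 && y == 2) <;> cases h4 : (x == 4 && y == 4) <;>
        simp [ih] <;> cases b <;> cases two <;> cases four <;>
          (exfalso; simp only [beq_iff_eq, Bool.and_eq_true] at h1 h4; omega)

-- ===== VERDICT (by name: the statement is the Claim_ definition above) =====
theorem either24_spec : Claim_equal_either24 := by
  intro nums _
  unfold Spec_either24 either24 either24_alt
  rw [either24Loop_eq]
  cases h2 : hasPair 2 nums <;> cases h4 : hasPair 4 nums <;> simp
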